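-- pv_equiv track=rewrite | github.com/westonbrown/Cyber-AutoAgent | src/modules/prompts/report.py | format_evidence_for_report
-- ===== SOURCE A (Python) =====
-- from typing import Dict, List, Any
--
-- def format_evidence_for_report(evidence: List[Dict[str, Any]], max_items: int = 100) -> str:
--     """
--     Format evidence list into structured text for the report.
--
--     Args:
--         evidence: List of evidence dictionaries
--         max_items: Maximum number of items to include (increased for comprehensive reports)
--
--     Returns:
--         Formatted evidence text with structured tags
--     """
--     if not evidence:
--         return "<no_evidence>No specific evidence collected during assessment.</no_evidence>"
--
--     evidence_text = "<evidence_collection>\n"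
--
--     # Group evidence by severity for better organization
--     severity_groups = {"CRITICAL": [], "HIGH": [], "MEDIUM": [], "LOW": [], "INFO": []}
--
--     for item in evidence[:max_items]:
--         if item.get("category") == "finding":
--             severity = item.get("severity", "INFO").upper()
--             if severity in severity_groups:
--                 severity_groups[severity].append(item)
--             else:
--                 severity_groups["INFO"].append(item)
--         else:
--             severity_groups["INFO"].append(item)
--
--     # Format evidence by severity groups
--     finding_number = 1
--     for severity in ["CRITICAL", "HIGH", "MEDIUM", "LOW", "INFO"]:
--         if severity_groups[severity]:
--             evidence_text += f"\n<{severity.lower()}_findings>\n"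
--             for item in severity_groups[severity]:
--                 category = item.get("category", "unknown").upper()
--                 content = item.get("content", "")[:800]  # Balanced for 3-page reports
--                 confidence = item.get("confidence", "unknown")
--
--                 if item.get("category") == "finding":
--                     if confidence != "unknown":
--                         evidence_text += f"{finding_number}. [{category} | {severity} | {confidence}] {content}"
--                     else:
--                         evidence_text += f"{finding_number}. [{category} | {severity}] {content}"
--                 else:
--                     evidence_text += f"{finding_number}. [{category}] {content}"
--
--                 if len(item.get("content", "")) > 800:
--                     evidence_text += "..."
--                 evidence_text += "\n"
--                 finding_number += 1
--             evidence_text += f"</{severity.lower()}_findings>\n"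
--
--     evidence_text += "</evidence_collection>"
--     return evidence_text
-- ===== SOURCE B (Python) =====
-- # B: sort-then-scan -- decorate each item with (rank*n + position), stable-sort once,
-- # then render consecutive equal-rank runs with a single running counter (no dict, no
-- # per-severity grouping pass).
-- from typing import Dict, List, Any
--
-- _ORDER = ["CRITICAL", "HIGH", "MEDIUM", "LOW", "INFO"]
--
--
-- def _rank(item):
--     if item.get("category") == "finding":
--         s = item.get("severity", "INFO").upper()
--         if s in _ORDER:
--             return _ORDER.index(s)
--     return 4
--
--
-- def _line(num, item, severity):
--     category = item.get("category", "unknown").upper()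
--     content = item.get("content", "")[:800]
--     confidence = item.get("confidence", "unknown")
--     if item.get("category") == "finding":
--         if confidence != "unknown":
--             head = f"{num}. [{category} | {severity} | {confidence}] {content}"
--         else:
--             head = f"{num}. [{category} | {severity}] {content}"
--     else:
--         head = f"{num}. [{category}] {content}"
--     tail = "..." if len(item.get("content", "")) > 800 else ""
--     return head + tail + "\n"
--
--
-- def _render(ds, num):
--     if not ds:
--         return ""
--     r = _rank(ds[0][1])
--     grp = []
--     rest = ds
--     while rest and _rank(rest[0][1]) == r:
--         grp.append(rest[0])
--         rest = rest[1:]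
--     sev = _ORDER[r]
--     lines = "".join(_line(j, p[1], sev) for j, p in enumerate(grp, num))
--     tag = sev.lower()
--     return f"\n<{tag}_findings>\n{lines}</{tag}_findings>\n" + _render(rest, num + len(grp))
--
--
-- def format_evidence_for_report(evidence: List[Dict[str, Any]], max_items: int = 100) -> str:
--     if not evidence:
--         return "<no_evidence>No specific evidence collected during assessment.</no_evidence>"
--     items = evidence[:max_items]
--     n = len(items)
--     decorated = sorted(enumerate(items), key=lambda p: _rank(p[1]) * n + p[0])
--     return "<evidence_collection>\n" + _render(decorated, 1) + "</evidence_collection>"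
-- ===== Notes on version B (the rewrite author's own statement) =====
-- stated objective: alternative
-- what changed: Replaces A's severity_groups dict plus five-severity formatting loop by a decorate-sort-scan: each item is tagged with rank*n+index, the list is stable-sorted once, and a single recursive scan renders consecutive equal-rank runs with one running counter.
import Mathlib
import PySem

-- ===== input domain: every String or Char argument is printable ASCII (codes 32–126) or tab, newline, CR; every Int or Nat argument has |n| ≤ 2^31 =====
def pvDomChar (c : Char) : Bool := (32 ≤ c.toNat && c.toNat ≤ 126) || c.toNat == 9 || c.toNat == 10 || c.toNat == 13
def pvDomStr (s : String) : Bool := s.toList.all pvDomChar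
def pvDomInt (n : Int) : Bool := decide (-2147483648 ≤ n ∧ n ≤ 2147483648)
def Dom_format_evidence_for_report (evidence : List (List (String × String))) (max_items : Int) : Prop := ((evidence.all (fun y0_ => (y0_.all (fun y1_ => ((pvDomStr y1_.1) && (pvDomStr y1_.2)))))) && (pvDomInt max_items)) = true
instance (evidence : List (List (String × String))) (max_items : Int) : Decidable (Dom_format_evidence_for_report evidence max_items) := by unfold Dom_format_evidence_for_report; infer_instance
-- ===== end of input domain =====

-- B replaces A's dict grouping + five-severity formatting loop by decorate-sort-scan:
-- stable-sort the enumerated items by rank*n+index once, then render consecutive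
-- equal-rank runs with one running counter (alternative decomposition).


-- item.get(k) on a Python dict = first-match lookup on the association list
def pvGet (item : List (String × String)) (k : String) : Option String :=
  (PySem.Dict.mk item).get? k

def pvGetD (item : List (String × String)) (k d : String) : String :=
  (pvGet item k).getD d

def sevOrder : List String := ["CRITICAL", "HIGH", "MEDIUM", "LOW", "INFO"]

-- ===== PORT A =====
-- the grouping loop body: append item to its severity group (unknown/non-finding -> INFO)
def aGroupStep (g : PySem.Dict String (List (List (String × String))))
    (item : List (String × String)) : PySem.Dict String (List (List (String × String))) :=
  if pvGet item "category" = some "finding" then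
    let severity := PySem.Str.upper (pvGetD item "severity" "INFO")
    if g.contains severity then g.modify severity [] (· ++ [item])
    else g.modify "INFO" [] (· ++ [item])
  else g.modify "INFO" [] (· ++ [item])

-- one item of the formatting loop: acc = (evidence_text, finding_number)
def aItemStep (severity : String) (acc : String × Int) (item : List (String × String)) :
    String × Int :=
  let category := PySem.Str.upper (pvGetD item "category" "unknown")
  let content := PySem.Str.slice (pvGetD item "content" "") none (some 800)
  let confidence := pvGetD item "confidence" "unknown"
  let t :=
    if pvGet item "category" = some "finding" then
      if confidence ≠ "unknown" then
        acc.1 ++ PySem.Int.toStr acc.2 ++ ". [" ++ category ++ " | " ++ severity ++ " | " ++ confidence ++ "] " ++ content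
      else
        acc.1 ++ PySem.Int.toStr acc.2 ++ ". [" ++ category ++ " | " ++ severity ++ "] " ++ content
    else
      acc.1 ++ PySem.Int.toStr acc.2 ++ ". [" ++ category ++ "] " ++ content
  let t := if 800 < PySem.Str.len (pvGetD item "content" "") then t ++ "..." else t
  (t ++ "\n", acc.2 + 1)

-- one severity of the outer formatting loop
def aSevStep (groups : PySem.Dict String (List (List (String × String))))
    (acc : String × Int) (severity : String) : String × Int :=
  if groups.getD severity [] ≠ [] then
    let acc := (acc.1 ++ "\n<" ++ PySem.Str.lower severity ++ "_findings>\n", acc.2)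
    let acc := (groups.getD severity []).foldl (aItemStep severity) acc
    (acc.1 ++ "</" ++ PySem.Str.lower severity ++ "_findings>\n", acc.2)
  else acc

def format_evidence_for_report (evidence : List (List (String × String))) (max_items : Int) : String :=
  if evidence = [] then
    "<no_evidence>No specific evidence collected during assessment.</no_evidence>"
  else
    let groups := (PySem.List.slice evidence none (some max_items)).foldl aGroupStep
      (PySem.Dict.ofList [("CRITICAL", []), ("HIGH", []), ("MEDIUM", []), ("LOW", []), ("INFO", [])])
    let res := sevOrder.foldl (aSevStep groups) ("<evidence_collection>\n", 1)
    res.1 ++ "</evidence_collection>"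

-- ===== PORT B =====
-- _rank: position of the item's effective severity in the fixed order (non-finding / unknown -> 4)
def bRank (item : List (String × String)) : Int :=
  if pvGet item "category" = some "finding" then
    let s := PySem.Str.upper (pvGetD item "severity" "INFO")
    if s ∈ sevOrder then
      match PySem.List.index? sevOrder s with
      | some i => (i : Int)
      | none => 4
    else 4
  else 4

-- _line: one numbered report line
def bLine (num : Int) (item : List (String × String)) (severity : String) : String :=
  let category := PySem.Str.upper (pvGetD item "category" "unknown")
  let content := PySem.Str.slice (pvGetD item "content" "") none (some 800)
  let confidence := pvGetD item "confidence" "unknown"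
  let head :=
    if pvGet item "category" = some "finding" then
      if confidence ≠ "unknown" then
        PySem.Int.toStr num ++ ". [" ++ category ++ " | " ++ severity ++ " | " ++ confidence ++ "] " ++ content
      else
        PySem.Int.toStr num ++ ". [" ++ category ++ " | " ++ severity ++ "] " ++ content
    else
      PySem.Int.toStr num ++ ". [" ++ category ++ "] " ++ content
  let tail := if 800 < PySem.Str.len (pvGetD item "content" "") then "..." else ""
  head ++ tail ++ "\n"

-- _render: peel the leading equal-rank run off the sorted list, emit its block, recurse
def bRender : List (Int × List (String × String)) → Int → String
  | [], _ => ""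
  | d :: tl, num =>
    let r := bRank d.2
    let grp := List.takeWhile (fun p => bRank p.2 == r) (d :: tl)
    let rest := List.dropWhile (fun p => bRank p.2 == r) (d :: tl)
    let sev := PySem.List.pyGetD sevOrder r "INFO"
    let lines := (PySem.List.enumerate grp num).foldl (fun t q => t ++ bLine q.1 q.2.2 sev) ""
    "\n<" ++ PySem.Str.lower sev ++ "_findings>\n" ++ lines ++ "</" ++ PySem.Str.lower sev ++ "_findings>\n" ++
      bRender rest (num + (grp.length : Int))
  termination_by ds _ => ds.length
  decreasing_by
    simp only [List.dropWhile, BEq.rfl, List.length_cons]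
    exact Nat.lt_succ_of_le (List.Sublist.length_le (List.dropWhile_sublist _))

def format_evidence_for_report_alt (evidence : List (List (String × String))) (max_items : Int) : String :=
  if evidence = [] then
    "<no_evidence>No specific evidence collected during assessment.</no_evidence>"
  else
    let items := PySem.List.slice evidence none (some max_items)
    let n : Int := (items.length : Int)
    let decorated := PySem.List.sorted (PySem.List.enumerate items 0)
      (fun p => bRank p.2 * n + p.1) false
    "<evidence_collection>\n" ++ bRender decorated 1 ++ "</evidence_collection>"

-- ===== PRECONDITION & SPEC =====
def Spec_format_evidence_for_report (evidence : List (List (String × String))) (max_items : Int) (out : String) : Prop := out = format_evidence_for_report_alt evidence max_items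
instance (evidence : List (List (String × String))) (max_items : Int) (out : String) : Decidable (Spec_format_evidence_for_report evidence max_items out) := by unfold Spec_format_evidence_for_report; infer_instance

-- ===== CLAIM =====
def Claim_equal_format_evidence_for_report : Prop := ∀ (evidence : List (List (String × String))) (max_items : Int), Dom_format_evidence_for_report evidence max_items → Spec_format_evidence_for_report evidence max_items (format_evidence_for_report evidence max_items)

-- ===== LEMMAS AND PROOFS =====

-- the effective severity string A assigns to an item
def effSev (item : List (String × String)) : String :=
  if pvGet item "category" = some "finding" then
    let s := PySem.Str.upper (pvGetD item "severity" "INFO")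
    if s ∈ sevOrder then s else "INFO"
  else "INFO"

def rankList : List Int := [0, 1, 2, 3, 4]

-- proof-side mirror of one severity block, indexed by rank, over the enumerated pairs
def rStep (l : List (Int × List (String × String))) (acc : String × Int) (r : Int) :
    String × Int :=
  let grp := l.filter (fun p => bRank p.2 == r)
  if grp = [] then acc
  else
    let sev := PySem.List.pyGetD sevOrder r "INFO"
    let lines := (PySem.List.enumerate grp acc.2).foldl (fun t q => t ++ bLine q.1 q.2.2 sev) ""
    (acc.1 ++ "\n<" ++ PySem.Str.lower sev ++ "_findings>\n" ++ lines ++ "</" ++ PySem.Str.lower sev ++ "_findings>\n",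
     acc.2 + (grp.length : Int))

-- the rank-grouped rearrangement the sort produces
def concatG : List Int → List (Int × List (String × String)) → List (Int × List (String × String))
  | [], _ => []
  | r :: rs, l => l.filter (fun p => bRank p.2 == r) ++ concatG rs l

theorem effSev_mem (item : List (String × String)) : effSev item ∈ sevOrder := by
  unfold effSev
  split_ifs with h1
  · by_cases h2 : PySem.Str.upper (pvGetD item "severity" "INFO") ∈ sevOrder
    · simp [h2]
    · simp only [h2, if_false]; decide
  · decide

-- the severity at an item's rank is its effective severity, and ranks lie in 0..4
theorem bRank_char (item : List (String × String)) :
    PySem.List.pyGetD sevOrder (bRank item) "INFO" = effSev item ∧ bRank item ∈ rankList := by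
  unfold bRank effSev
  by_cases h1 : pvGet item "category" = some "finding"
  · by_cases h2 : PySem.Str.upper (pvGetD item "severity" "INFO") ∈ sevOrder
    · have h2' := h2
      simp only [sevOrder, List.mem_cons, List.not_mem_nil, or_false] at h2'
      rcases h2' with h | h | h | h | h <;> simp only [h1, h, if_true] <;> decide
    · simp only [h1, if_true, h2, if_false]
      decide
  · simp only [h1, if_false]
    decide

-- matching on effective severity = matching on rank (for ranks in 0..4)
theorem filt_pred (r : Int) (hr : r ∈ rankList) (item : List (String × String)) :
    (effSev item == PySem.List.pyGetD sevOrder r "INFO") = (bRank item == r) := by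
  obtain ⟨hsev, hm⟩ := bRank_char item
  by_cases he : bRank item = r
  · rw [← he, hsev]; simp
  · have hne : effSev item ≠ PySem.List.pyGetD sevOrder r "INFO" := by
      rw [← hsev]
      intro hc
      exact he ((by decide : ∀ i ∈ rankList, ∀ j ∈ rankList,
        PySem.List.pyGetD sevOrder i "INFO" = PySem.List.pyGetD sevOrder j "INFO" → i = j) _ hm _ hr hc)
    simp [hne, he]

-- A's per-item formatting step is B's line appended, number bumped
theorem aItemStep_eq (s : String) (acc : String × Int) (item : List (String × String)) :
    aItemStep s acc item = (acc.1 ++ bLine acc.2 item s, acc.2 + 1) := by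
  unfold aItemStep bLine
  split_ifs <;> simp [String.append_assoc] <;> split_ifs <;> simp [String.append_assoc]

-- factoring the initial string out of a string-accumulating foldl
theorem foldl_str_init {α : Type} (g : α → String) (l : List α) (u : String) :
    l.foldl (fun t x => t ++ g x) u = u ++ l.foldl (fun t x => t ++ g x) "" := by
  induction l generalizing u with
  | nil => simp [List.foldl]
  | cons x xs ih =>
    simp only [List.foldl]
    rw [ih (u ++ g x), ih ("" ++ g x)]
    simp [String.append_assoc]

-- A's inner loop over one group = enumerate-based line concatenation
theorem inner_eq (s : String) (grp : List (List (String × String))) (t : String) (n : Int) :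
    grp.foldl (aItemStep s) (t, n)
      = (t ++ (PySem.List.enumerate grp n).foldl (fun u p => u ++ bLine p.1 p.2 s) "",
         n + grp.length) := by
  induction grp generalizing t n with
  | nil => simp [List.foldl, PySem.List.enumerate_nil]
  | cons x xs ih =>
    simp only [List.foldl, aItemStep_eq, PySem.List.enumerate_cons]
    rw [ih]
    rw [foldl_str_init (fun p => bLine p.1 p.2 s) (PySem.List.enumerate xs (n + 1)) ("" ++ bLine n x s)]
    simp [String.append_assoc]
    omega

-- with all five keys present, A's grouping step appends to the effective-severity bucket
theorem aGroupStep_eq (g : PySem.Dict String (List (List (String × String))))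
    (hk : g.keys = sevOrder) (item : List (String × String)) :
    aGroupStep g item = g.modify (effSev item) [] (· ++ [item]) := by
  unfold aGroupStep effSev
  split_ifs with h1
  · have hc : g.contains (PySem.Str.upper (pvGetD item "severity" "INFO"))
        = decide ((PySem.Str.upper (pvGetD item "severity" "INFO")) ∈ g.keys) :=
      PySem.Dict.contains_eq_decide_mem_keys g _
    rw [hk] at hc
    by_cases hm : (PySem.Str.upper (pvGetD item "severity" "INFO")) ∈ sevOrder
    · simp [hc, hm]
    · simp [hc, hm]
  · rfl

-- the grouping loop's bucket for any key s = filter by effective severity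
theorem group_filter (items : List (List (String × String)))
    (g : PySem.Dict String (List (List (String × String)))) (hk : g.keys = sevOrder)
    (s : String) :
    (items.foldl aGroupStep g).getD s []
      = g.getD s [] ++ items.filter (fun it => effSev it == s) := by
  induction items generalizing g with
  | nil => simp [List.foldl]
  | cons x xs ih =>
    simp only [List.foldl, List.filter]
    rw [aGroupStep_eq g hk x]
    have hc : g.contains (effSev x) = true := by
      rw [PySem.Dict.contains_eq_decide_mem_keys, hk]
      simpa using effSev_mem x
    have hk' : (g.modify (effSev x) [] (· ++ [x])).keys = sevOrder := by
      rw [PySem.Dict.keys_modify, PySem.Dict.keys_insert_of_contains g _ hc]; exact hk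
    rw [ih _ hk']
    rw [PySem.Dict.getD_modify]
    by_cases hs : s = effSev x
    · simp [hs, List.append_assoc]
    · have : (effSev x == s) = false := by simp [Ne.symm hs]
      simp [hs, this]

-- filtering the enumerated pairs on the item and projecting = filtering the items
theorem filter_enumerate_map {α : Type} (q : α → Bool) (xs : List α) (s : Int) :
    ((PySem.List.enumerate xs s).filter (fun p => q p.2)).map (·.2) = xs.filter q := by
  induction xs generalizing s with
  | nil => simp [PySem.List.enumerate_nil]
  | cons x xs ih =>
    simp only [PySem.List.enumerate_cons, List.filter, List.filter_cons]
    by_cases hq : q x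
    · simp [hq, ih (s + 1)]
    · simp [hq, ih (s + 1)]

-- enumerate of a projection
theorem enumerate_map {α β : Type} (f : α → β) (l : List α) (s : Int) :
    PySem.List.enumerate (l.map f) s = (PySem.List.enumerate l s).map (fun p => (p.1, f p.2)) := by
  induction l generalizing s with
  | nil => simp [PySem.List.enumerate_nil]
  | cons x xs ih => simp [PySem.List.enumerate_cons, ih (s + 1)]

-- takeWhile/dropWhile on a run followed by a non-matching head
theorem run_split {α : Type} (q : α → Bool) (a b : List α)
    (ha : ∀ x ∈ a, q x = true) (hb : ∀ y, b.head? = some y → q y = false) :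
    (a ++ b).takeWhile q = a ∧ (a ++ b).dropWhile q = b := by
  induction a with
  | nil =>
    simp only [List.nil_append]
    cases b with
    | nil => simp
    | cons y b' =>
      have := hb y rfl
      simp [this]
  | cons x a' ih =>
    have hx := ha x (by simp)
    have := ih (fun z hz => ha z (by simp [hz]))
    simp [hx, this.1, this.2]

theorem mem_concatG (rs : List Int) (l : List (Int × List (String × String)))
    (x : Int × List (String × String)) (hx : x ∈ concatG rs l) : x ∈ l ∧ bRank x.2 ∈ rs := by
  induction rs with
  | nil => simp [concatG] at hx
  | cons r rs ih =>
    simp only [concatG, List.mem_append, List.mem_filter] at hx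
    rcases hx with ⟨hl, hr⟩ | h
    · exact ⟨hl, by simp at hr; simp [hr]⟩
    · obtain ⟨h1, h2⟩ := ih h
      exact ⟨h1, by simp [h2]⟩

-- removing items of an absent rank does not change the grouping
theorem concatG_filter_ne (rs : List Int) (l : List (Int × List (String × String))) (r : Int)
    (h : r ∉ rs) :
    concatG rs (l.filter (fun p => !(bRank p.2 == r))) = concatG rs l := by
  induction rs with
  | nil => rfl
  | cons r' rs ih =>
    simp only [concatG]
    rw [List.filter_filter, ih (fun hm => h (by simp [hm]))]
    congr 1
    apply List.filter_congr
    intro p _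
    by_cases hp : bRank p.2 = r'
    · have hne : r' ≠ r := by intro hc; exact h (by simp [hc])
      simp [hp, hne]
    · simp [hp]

theorem concatG_perm (rs : List Int) (l : List (Int × List (String × String)))
    (hmem : ∀ x ∈ l, bRank x.2 ∈ rs) (hnd : rs.Nodup) : (concatG rs l).Perm l := by
  induction rs generalizing l with
  | nil =>
    have : l = [] := by
      cases l with
      | nil => rfl
      | cons y t => exact absurd (hmem y (by simp)) (by simp)
    simp [concatG, this]
  | cons r rs ih =>
    simp only [concatG]
    have hnotin : r ∉ rs := by simp [List.nodup_cons] at hnd; exact hnd.1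
    rw [← concatG_filter_ne rs l r hnotin]
    have hperm := ih (l.filter (fun p => !(bRank p.2 == r)))
      (fun x hx => by
        have hxl := List.mem_of_mem_filter hx
        have hq := List.of_mem_filter hx
        simp only [Bool.not_eq_true', beq_eq_false_iff_ne, ne_eq] at hq
        have := hmem x hxl
        simp at this
        rcases this with h | h
        · exact absurd h hq
        · exact h)
      (by simp [List.nodup_cons] at hnd; exact hnd.2)
    exact List.Perm.trans (List.Perm.append_left _ hperm) (List.filter_append_perm _ l)

theorem concatG_pairwise (rs : List Int) (l : List (Int × List (String × String))) (n : Int)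
    (hrs : rs.Pairwise (· < ·)) (hb : ∀ p ∈ l, 0 ≤ p.1 ∧ p.1 < n)
    (hl : l.Pairwise (fun a b => a.1 < b.1)) :
    (concatG rs l).Pairwise
      (fun a b => bRank a.2 * n + a.1 < bRank b.2 * n + b.1) := by
  induction rs with
  | nil => simp [concatG]
  | cons r rs ih =>
    simp only [concatG]
    rw [List.pairwise_append]
    refine ⟨?_, ih (List.Pairwise.sublist (List.sublist_cons_self r rs) hrs), ?_⟩
    · rw [List.pairwise_filter]
      refine hl.imp_of_mem ?_
      intro a b _ _ hab hra hrb
      simp only [beq_iff_eq] at hra hrb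
      rw [hra, hrb]
      omega
    · intro a hain b hbin
      have hra : bRank a.2 = r := by simpa using (List.of_mem_filter hain)
      have hal : a ∈ l := List.mem_of_mem_filter hain
      obtain ⟨hbl, hbr⟩ := mem_concatG rs l b hbin
      have hrlt : r < bRank b.2 := (List.rel_of_pairwise_cons hrs) hbr
      obtain ⟨_, han⟩ := hb a hal
      obtain ⟨hb0, _⟩ := hb b hbl
      have h1 : (r + 1) * n ≤ bRank b.2 * n := by
        apply mul_le_mul_of_nonneg_right (by omega)
        have := hb a hal; omega
      rw [hra]
      nlinarith
  
-- every pair of the enumeration has its index in [s, s + len)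
theorem enumerate_bounds {α : Type} (xs : List α) (s : Int) (p : Int × α)
    (hp : p ∈ PySem.List.enumerate xs s) : s ≤ p.1 ∧ p.1 < s + xs.length := by
  have : p.1 ∈ (PySem.List.enumerate xs s).map (·.1) := List.mem_map_of_mem hp
  rw [PySem.List.map_fst_enumerate] at this
  exact (PySem.List.mem_pyRange_one).mp this

theorem enumerate_pairwise_fst {α : Type} (xs : List α) (s : Int) :
    (PySem.List.enumerate xs s).Pairwise (fun a b => a.1 < b.1) := by
  have h := PySem.List.pairwise_lt_pyRange_one s (s + xs.length)
  rw [← PySem.List.map_fst_enumerate xs s] at h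
  exact (List.pairwise_map).mp h

-- the stable sort by rank*n+index is exactly the rank-grouped rearrangement
theorem sorted_eq_concatG (items : List (List (String × String))) :
    PySem.List.sorted (PySem.List.enumerate items 0)
      (fun p => bRank p.2 * (items.length : Int) + p.1) false
      = concatG rankList (PySem.List.enumerate items 0) := by
  apply PySem.List.sorted_eq_of_perm_of_pairwise_lt
  · exact concatG_perm rankList _ (fun x _ => (bRank_char x.2).2) (by decide)
  · apply concatG_pairwise
    · decide
    · intro p hp
      have := enumerate_bounds items 0 p hp
      omega
    · exact enumerate_pairwise_fst items 0

-- one rank step from an arbitrary starting text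
theorem rStep_single (l : List (Int × List (String × String))) (r : Int) (t : String) (n : Int) :
    rStep l (t, n) r = (t ++ (rStep l ("", n) r).1, (rStep l ("", n) r).2) := by
  unfold rStep
  by_cases hg : l.filter (fun p => bRank p.2 == r) = []
  · simp [hg]
  · simp [hg, String.append_assoc]

-- factoring the initial text out of the rank fold
theorem rStep_init (l : List (Int × List (String × String))) (rs : List Int) (t : String) (n : Int) :
    rs.foldl (rStep l) (t, n)
      = (t ++ (rs.foldl (rStep l) ("", n)).1, (rs.foldl (rStep l) ("", n)).2) := by
  induction rs generalizing t n with
  | nil => simp [List.foldl]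
  | cons r rs ih =>
    simp only [List.foldl]
    rw [rStep_single l r t n, ih]
    have h2 := ih (rStep l ("", n) r).1 (rStep l ("", n) r).2
    rw [Prod.mk.eta] at h2
    rw [h2]
    simp [String.append_assoc]

-- rendering the grouped list is the fold of blocks over the (increasing) rank list
theorem render_concatG (rs : List Int) (l : List (Int × List (String × String))) (num : Int)
    (hrs : rs.Pairwise (· < ·)) :
    bRender (concatG rs l) num = (rs.foldl (rStep l) ("", num)).1 := by
  induction rs generalizing num with
  | nil => simp [concatG, bRender, List.foldl]
  | cons r rs ih =>
    have htl := List.Pairwise.sublist (List.sublist_cons_self r rs) hrs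
    simp only [concatG, List.foldl]
    by_cases hg : l.filter (fun p => bRank p.2 == r) = []
    · rw [hg]
      simp only [List.nil_append]
      rw [ih num htl]
      unfold rStep
      simp [hg]
    · obtain ⟨d, gtl, hdg⟩ := List.exists_cons_of_ne_nil hg
      have hsplit : ((d :: gtl) ++ concatG rs l).takeWhile (fun p => bRank p.2 == bRank d.2) = d :: gtl ∧
          ((d :: gtl) ++ concatG rs l).dropWhile (fun p => bRank p.2 == bRank d.2) = concatG rs l := by
        have hdr : bRank d.2 = r := by
          have : d ∈ l.filter (fun p => bRank p.2 == r) := by rw [hdg]; simp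
          simpa using List.of_mem_filter this
        apply run_split
        · intro x hx
          have : x ∈ l.filter (fun p => bRank p.2 == r) := by rw [hdg]; exact hx
          have := List.of_mem_filter this
          simp only [beq_iff_eq] at this ⊢
          rw [this, hdr]
        · intro y hy
          have hymem : y ∈ concatG rs l := List.mem_of_mem_head? hy
          obtain ⟨_, hyr⟩ := mem_concatG rs l y hymem
          have : r < bRank y.2 := (List.rel_of_pairwise_cons hrs) hyr
          simp only [beq_eq_false_iff_ne, ne_eq]
          rw [hdr]; omega
      have hdr : bRank d.2 = r := by
        have : d ∈ l.filter (fun p => bRank p.2 == r) := by rw [hdg]; simp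
        simpa using List.of_mem_filter this
      rw [hdg]
      show bRender (d :: (gtl ++ concatG rs l)) num = _
      rw [bRender]
      simp only [← List.cons_append, hsplit.1, hsplit.2]
      rw [ih _ htl]
      conv_rhs => rw [← Prod.mk.eta (p := rStep l ("", num) r)]
      rw [rStep_init l rs]
      have hx : rStep l ("", num) r
          = ("" ++ ("\n<" ++ PySem.Str.lower (PySem.List.pyGetD sevOrder r "INFO") ++ "_findings>\n" ++
              (PySem.List.enumerate (l.filter (fun p => bRank p.2 == r)) num).foldl
                (fun t q => t ++ bLine q.1 q.2.2 (PySem.List.pyGetD sevOrder r "INFO")) "" ++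
              "</" ++ PySem.Str.lower (PySem.List.pyGetD sevOrder r "INFO") ++ "_findings>\n"),
             num + ((l.filter (fun p => bRank p.2 == r)).length : Int)) := by
        unfold rStep
        simp [hg, String.append_assoc]
      rw [hx]
      simp only [hdr, ← hdg]
      simp only [String.append_assoc, String.empty_append]
      conv_rhs => rw [rStep_init l rs]
      simp [String.append_assoc]

-- A's severity step at the severity of rank r is the rank step over the enumerated pairs
theorem sev_rstep (items : List (List (String × String))) (r : Int) (hr : r ∈ rankList)
    (acc : String × Int) :
    aSevStep ((items.foldl aGroupStep
        (PySem.Dict.ofList [("CRITICAL", []), ("HIGH", []), ("MEDIUM", []), ("LOW", []), ("INFO", [])])))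
      acc (PySem.List.pyGetD sevOrder r "INFO")
      = rStep (PySem.List.enumerate items 0) acc r := by
  have hk0 : (PySem.Dict.ofList
      ([("CRITICAL", []), ("HIGH", []), ("MEDIUM", []), ("LOW", []), ("INFO", [])] :
        List (String × List (List (String × String))))).keys = sevOrder := by decide
  have h0 : ∀ s, (PySem.Dict.ofList
      ([("CRITICAL", []), ("HIGH", []), ("MEDIUM", []), ("LOW", []), ("INFO", [])] :
        List (String × List (List (String × String))))).getD s [] = [] := by
    intro s
    have hmk : (PySem.Dict.ofList
        ([("CRITICAL", []), ("HIGH", []), ("MEDIUM", []), ("LOW", []), ("INFO", [])] :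
          List (String × List (List (String × String)))))
        = PySem.Dict.mk [("CRITICAL", []), ("HIGH", []), ("MEDIUM", []), ("LOW", []), ("INFO", [])] := by
      decide
    rw [hmk]
    simp only [PySem.Dict.getD_eq_get?_getD, PySem.Dict.get?_mk_cons]
    split_ifs <;> rfl
  set s := PySem.List.pyGetD sevOrder r "INFO" with hs
  have hgrp : (items.foldl aGroupStep
      (PySem.Dict.ofList [("CRITICAL", []), ("HIGH", []), ("MEDIUM", []), ("LOW", []), ("INFO", [])])).getD s []
      = ((PySem.List.enumerate items 0).filter (fun p => bRank p.2 == r)).map (·.2) := by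
    rw [group_filter _ _ hk0 s, h0 s, List.nil_append]
    rw [filter_enumerate_map (fun it => bRank it == r) items 0]
    apply List.filter_congr
    intro it _
    rw [← filt_pred r hr it, hs]
  unfold aSevStep rStep
  rw [hgrp]
  by_cases hg : (PySem.List.enumerate items 0).filter (fun p => bRank p.2 == r) = []
  · simp [hg]
  · have hne : ((PySem.List.enumerate items 0).filter (fun p => bRank p.2 == r)).map (·.2) ≠ [] := by
      simp [hg]
    simp only [hne, ne_eq, if_false, if_true, not_false_eq_true, hg]
    rw [inner_eq]
    rw [enumerate_map (fun p : Int × List (String × String) => p.2)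
        ((PySem.List.enumerate items 0).filter (fun p => bRank p.2 == r)) acc.2]
    rw [List.foldl_map]
    simp [String.append_assoc, hs]

-- ===== VERDICT =====
theorem format_evidence_for_report_spec : Claim_equal_format_evidence_for_report := by
  unfold Claim_equal_format_evidence_for_report
  intro evidence max_items _
  unfold Spec_format_evidence_for_report
  unfold format_evidence_for_report format_evidence_for_report_alt
  by_cases he : evidence = []
  · simp [he]
  · simp only [if_neg he]
    set items := PySem.List.slice evidence none (some max_items) with hitems
    have hsev : ∀ (r : Int), r ∈ rankList → ∀ acc,
        aSevStep ((items.foldl aGroupStep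
          (PySem.Dict.ofList [("CRITICAL", []), ("HIGH", []), ("MEDIUM", []), ("LOW", []), ("INFO", [])])))
          acc (PySem.List.pyGetD sevOrder r "INFO")
          = rStep (PySem.List.enumerate items 0) acc r :=
      fun r hr acc => sev_rstep items r hr acc
    have e0 := hsev 0 (by decide)
    have e1 := hsev 1 (by decide)
    have e2 := hsev 2 (by decide)
    have e3 := hsev 3 (by decide)
    have e4 := hsev 4 (by decide)
    rw [show PySem.List.pyGetD sevOrder (0 : Int) "INFO" = "CRITICAL" from by decide] at e0
    rw [show PySem.List.pyGetD sevOrder (1 : Int) "INFO" = "HIGH" from by decide] at e1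
    rw [show PySem.List.pyGetD sevOrder (2 : Int) "INFO" = "MEDIUM" from by decide] at e2
    rw [show PySem.List.pyGetD sevOrder (3 : Int) "INFO" = "LOW" from by decide] at e3
    rw [show PySem.List.pyGetD sevOrder (4 : Int) "INFO" = "INFO" from by decide] at e4
    have hA : sevOrder.foldl (aSevStep ((items.foldl aGroupStep
        (PySem.Dict.ofList [("CRITICAL", []), ("HIGH", []), ("MEDIUM", []), ("LOW", []), ("INFO", [])]))))
        ("<evidence_collection>\n", 1)
        = rankList.foldl (rStep (PySem.List.enumerate items 0)) ("<evidence_collection>\n", 1) := by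
      simp only [sevOrder, rankList, List.foldl]
      rw [e0, e1, e2, e3, e4]
    rw [hA]
    rw [sorted_eq_concatG items]
    rw [render_concatG rankList (PySem.List.enumerate items 0) 1 (by decide)]
    rw [rStep_init (PySem.List.enumerate items 0) rankList "<evidence_collection>\n" 1]
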